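-- pv_equiv track=rewrite | github.com/vladdick88/ouroboros | tests/test_constitution.py | is_change_not_deletion
-- ===== SOURCE A (Python) =====
-- def is_change_not_deletion(before: list[str], after: list[str]) -> bool:
--     """
--     Test: Is this a legitimate 'change' (augment/clarify) or a deletion?
--     Principle: if removing the new formulation leaves the original principle
--     recognizable, it's a change. If not — it's a deletion.
--     """
--     # Every original principle must still be recognizable in the after state
--     core_directions = [
--         "agency",
--         "continuity",
--         "self-creation",
--     ]
--     for direction in core_directions:
--         in_before = any(direction in p.lower() for p in before)
--         in_after = any(direction in p.lower() for p in after)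
--         if in_before and not in_after:
--             return False  # Core direction was removed — this is deletion
--     return True
-- ===== SOURCE B (Python) =====
-- def is_change_not_deletion(before: list[str], after: list[str]) -> bool:
--     core_directions = [
--         "agency",
--         "continuity",
--         "self-creation",
--     ]
--
--     def mask(texts):
--         m = 0
--         for p in texts:
--             low = p.lower()
--             for i, d in enumerate(core_directions):
--                 if d in low:
--                     m |= 1 << i
--         return m
--
--     mb = mask(before)
--     return mb & mask(after) == mb
-- ===== Notes on version B (the rewrite author's own statement) =====
-- stated objective: alternative
-- what changed: Inverts the loop structure: instead of A's per-direction early-return loop scanning the whole lists, B makes one pass over each list of texts (lowercasing each text once), accumulating a bitmask of directions seen, and decides with a single submask test mb & ma == mb.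
import Mathlib
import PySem

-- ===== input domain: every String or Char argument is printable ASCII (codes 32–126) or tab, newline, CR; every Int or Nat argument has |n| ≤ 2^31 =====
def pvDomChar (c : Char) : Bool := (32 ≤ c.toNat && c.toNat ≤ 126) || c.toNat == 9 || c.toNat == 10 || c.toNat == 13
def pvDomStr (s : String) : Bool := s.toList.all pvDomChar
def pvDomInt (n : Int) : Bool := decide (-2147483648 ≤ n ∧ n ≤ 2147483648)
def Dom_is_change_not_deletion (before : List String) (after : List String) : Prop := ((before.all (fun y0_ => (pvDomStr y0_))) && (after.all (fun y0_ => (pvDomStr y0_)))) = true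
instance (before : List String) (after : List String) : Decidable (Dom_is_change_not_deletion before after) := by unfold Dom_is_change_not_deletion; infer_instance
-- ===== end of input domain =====

-- B inverts the loop structure: one pass over each text list accumulating a bitmask of directions seen, then a submask test (alternative decomposition, same cost).

-- ===== PORT A =====
-- the for-loop over core_directions, with its early 'return False'
def coreLoopA (before : List String) (after : List String) : List String → Bool
  | [] => true
  | d :: rest =>
    let in_before := before.any (fun p => PySem.Str.isIn d (PySem.Str.lower p))
    let in_after := after.any (fun p => PySem.Str.isIn d (PySem.Str.lower p))
    if in_before && !in_after then false else coreLoopA before after rest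

def is_change_not_deletion (before : List String) (after : List String) : Bool :=
  coreLoopA before after ["agency", "continuity", "self-creation"]

-- ===== PORT B =====
-- core_directions, shared by both inner loops of B
def dirsB : List String := ["agency", "continuity", "self-creation"]

-- def mask(texts): accumulate m |= 1 << i for each direction d found in p.lower()
def maskB (texts : List String) : Nat :=
  texts.foldl (fun m p =>
    let low := PySem.Str.lower p
    (PySem.List.enumerate dirsB).foldl
      (fun m' id => if PySem.Str.isIn id.2 low then m' ||| (1 <<< id.1.toNat) else m') m) 0

def is_change_not_deletion_alt (before : List String) (after : List String) : Bool :=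
  let mb := maskB before
  mb &&& maskB after == mb

-- ===== PRECONDITION & SPEC =====
def Spec_is_change_not_deletion (before : List String) (after : List String) (out : Bool) : Prop := out = is_change_not_deletion_alt before after
instance (before : List String) (after : List String) (out : Bool) : Decidable (Spec_is_change_not_deletion before after out) := by unfold Spec_is_change_not_deletion; infer_instance

-- ===== CLAIM (what is proved, stated in full; the proofs are below) =====
def Claim_equal_is_change_not_deletion : Prop := ∀ (before : List String) (after : List String), Dom_is_change_not_deletion before after → Spec_is_change_not_deletion before after (is_change_not_deletion before after)

-- ===== LEMMAS AND PROOFS =====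

-- presence of one direction in a list of texts (A's `any` scan, named for the proofs)
def hasDir (d : String) (ts : List String) : Bool :=
  ts.any (fun p => PySem.Str.isIn d (PySem.Str.lower p))

-- B's per-text step (the inner enumerate-foldl of maskB, applied to one text)
def stepB (m : Nat) (p : String) : Nat :=
  let low := PySem.Str.lower p
  (PySem.List.enumerate dirsB).foldl
    (fun m' id => if PySem.Str.isIn id.2 low then m' ||| (1 <<< id.1.toNat) else m') m

lemma maskB_eq_foldl (ts : List String) : maskB ts = ts.foldl stepB 0 := rfl

lemma stepB_or (m : Nat) (p : String) : stepB m p = m ||| stepB 0 p := by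
  simp only [stepB, dirsB, PySem.List.enumerate]
  norm_num
  split_ifs <;> simp [Nat.or_assoc]

lemma foldl_stepB_or (ts : List String) (m : Nat) :
    ts.foldl stepB m = m ||| ts.foldl stepB 0 := by
  induction ts generalizing m with
  | nil => simp
  | cons p ts ih =>
    simp only [List.foldl_cons]
    rw [ih (stepB m p), ih (stepB 0 p), stepB_or, Nat.or_assoc]

-- disjoint bit-ors of the three presence bits combine pointwise
lemma bits_or (a b c a' b' c' : Bool) :
    (((if a then 1 else 0) ||| (if b then 2 else 0) ||| (if c then 4 else 0) : Nat) |||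
     ((if a' then 1 else 0) ||| (if b' then 2 else 0) ||| (if c' then 4 else 0))) =
    ((if a || a' then 1 else 0) ||| (if b || b' then 2 else 0) ||| (if c || c' then 4 else 0)) := by
  revert a b c a' b' c'; decide

-- characterization of maskB by the three presence bits
lemma maskB_char (ts : List String) :
    maskB ts = (if hasDir "agency" ts then 1 else 0)
           ||| (if hasDir "continuity" ts then 2 else 0)
           ||| (if hasDir "self-creation" ts then 4 else 0) := by
  induction ts with
  | nil => simp [maskB, hasDir]
  | cons p ts ih =>
    rw [maskB_eq_foldl, List.foldl_cons, foldl_stepB_or, ← maskB_eq_foldl, ih]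
    have h0 : stepB 0 p = (if PySem.Str.isIn "agency" (PySem.Str.lower p) then 1 else 0)
           ||| (if PySem.Str.isIn "continuity" (PySem.Str.lower p) then 2 else 0)
           ||| (if PySem.Str.isIn "self-creation" (PySem.Str.lower p) then 4 else 0) := by
      simp only [stepB, dirsB, PySem.List.enumerate]
      norm_num
      split_ifs <;> rfl
    rw [h0]
    simp only [hasDir, List.any_cons]
    exact bits_or _ _ _ _ _ _

-- A's loop, written as three nested ifs over the presence bits (definitional)
lemma A_char (before after : List String) :
    is_change_not_deletion before after =
      (if hasDir "agency" before && !hasDir "agency" after then false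
       else if hasDir "continuity" before && !hasDir "continuity" after then false
       else if hasDir "self-creation" before && !hasDir "self-creation" after then false
       else true) := rfl

-- the nested ifs equal the submask test, bit by bit
lemma final_bits (a b c a' b' c' : Bool) :
    (if a && !a' then false
     else if b && !b' then false
     else if c && !c' then false
     else true) =
    ((((if a then 1 else 0) ||| (if b then 2 else 0) ||| (if c then 4 else 0) : Nat) &&&
      ((if a' then 1 else 0) ||| (if b' then 2 else 0) ||| (if c' then 4 else 0))) ==
     ((if a then 1 else 0) ||| (if b then 2 else 0) ||| (if c then 4 else 0))) := by
  revert a b c a' b' c'; decide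

-- ===== VERDICT (by name: the statement is the Claim_ definition above) =====
theorem is_change_not_deletion_spec : Claim_equal_is_change_not_deletion := by
  intro before after _
  unfold Spec_is_change_not_deletion
  show is_change_not_deletion before after = (maskB before &&& maskB after == maskB before)
  rw [A_char, maskB_char, maskB_char]
  exact final_bits _ _ _ _ _ _
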